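-- pv_equiv track=rewrite | github.com/kevinmel2000/AsciiARt | pythonCandi/data/jincrud.py | jinTerajin
-- ===== SOURCE A (Python) =====
-- def jinTerajin(usersdata,candi):
--     lenuserdata=len(usersdata)
--     lencandi=len(candi)
--     usernamejinTerajin='-'
--
--     listJinPembangun=[]
--
--     for i in range(0,lenuserdata):
--         usertemp=usersdata[i]
--         usernametemp=usertemp[0]
--         passwordtemp=usertemp[1]
--         roletemp=usertemp[2]
--         if roletemp=='jin_pembangun':
--             jumlahCandiJin=0
--             for i in range(0,lencandi):
--                 canditemp=candi[i]
--                 candiIDtemp=canditemp[0]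
--                 jinCanditemp=canditemp[1]
--                 if jinCanditemp==usernametemp:
--                     jumlahCandiJin=jumlahCandiJin+1
--
--             dataJumlahJin=[usernametemp,jumlahCandiJin]
--             listJinPembangun.append(dataJumlahJin)
--
--     lenlistJin=len(listJinPembangun)
--     maxjumlah=0
--     #maxusernameJin='-'
--
--     for i in range(0,lenlistJin):
--         listjin=listJinPembangun[i]
--         usernamejin=listjin[0]
--         jumlahcandi=listjin[1]
--         if jumlahcandi>maxjumlah:
--             maxjumlah=jumlahcandi
--             usernamejinTerajin=usernamejin
--
--     return usernamejinTerajin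
-- ===== SOURCE B (Python) =====
-- def jinTerajin(usersdata, candi):
--     counts = {}
--     for row in candi:
--         counts[row[1]] = counts.get(row[1], 0) + 1
--     pairs = [(u[0], counts.get(u[0], 0)) for u in usersdata if u[2] == 'jin_pembangun']
--     if not pairs:
--         return '-'
--     best = sorted(pairs, key=lambda p: p[1], reverse=True)[0]
--     return best[0] if best[1] > 0 else '-'
-- ===== Notes on version B (the rewrite author's own statement) =====
-- stated objective: alternative
-- what changed: A counts each jin user's candi with a nested scan over candi and then runs a strict-> max loop; B builds one ownership counter over candi, lists (user,count) pairs in user order, and picks the top of a stable descending sort (ties resolve to the earliest user, and '-' when the top count is 0 or there are no jin users).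
-- outside the precondition, e.g. on jinTerajin([['u', 'p', 'raja']], [['c1']]): A returns '-', B raises IndexError
import Mathlib
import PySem

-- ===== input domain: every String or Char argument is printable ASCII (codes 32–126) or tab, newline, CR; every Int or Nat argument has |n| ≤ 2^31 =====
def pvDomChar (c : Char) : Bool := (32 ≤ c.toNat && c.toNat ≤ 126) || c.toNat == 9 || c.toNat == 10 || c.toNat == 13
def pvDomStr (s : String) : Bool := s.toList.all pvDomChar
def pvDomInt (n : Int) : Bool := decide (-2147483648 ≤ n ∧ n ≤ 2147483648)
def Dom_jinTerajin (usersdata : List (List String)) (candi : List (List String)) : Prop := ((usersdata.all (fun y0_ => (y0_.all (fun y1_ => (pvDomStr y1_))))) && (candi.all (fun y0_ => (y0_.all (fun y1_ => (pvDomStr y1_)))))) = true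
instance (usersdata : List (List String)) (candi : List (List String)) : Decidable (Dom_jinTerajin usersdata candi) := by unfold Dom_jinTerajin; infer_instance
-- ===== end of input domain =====

-- B replaces A's nested per-user scan over candi and strict-> max loop by a single ownership
-- counter over candi followed by a stable descending sort of the (user, count) pairs.

-- ===== PORT A =====
def jinTerajin (usersdata : List (List String)) (candi : List (List String)) : String :=
  let lenuserdata := PySem.List.len usersdata
  let lencandi := PySem.List.len candi
  let usernamejinTerajin := "-"
  let listJinPembangun : List (String × Int) :=
    (PySem.List.pyRange 0 lenuserdata).foldl (fun acc i =>
      let usertemp := PySem.List.pyGetD usersdata i []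
      let usernametemp := PySem.List.pyGetD usertemp 0 ""
      let _passwordtemp := PySem.List.pyGetD usertemp 1 ""
      let roletemp := PySem.List.pyGetD usertemp 2 ""
      if roletemp == "jin_pembangun" then
        let jumlahCandiJin := (PySem.List.pyRange 0 lencandi).foldl (fun c j =>
          let canditemp := PySem.List.pyGetD candi j []
          let _candiIDtemp := PySem.List.pyGetD canditemp 0 ""
          let jinCanditemp := PySem.List.pyGetD canditemp 1 ""
          if jinCanditemp == usernametemp then c + 1 else c) (0 : Int)
        acc ++ [(usernametemp, jumlahCandiJin)]
      else acc) []
  let res := (PySem.List.pyRange 0 (PySem.List.len listJinPembangun)).foldl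
    (fun st i =>
      let listjin := PySem.List.pyGetD listJinPembangun i ("", 0)
      let usernamejin := listjin.1
      let jumlahcandi := listjin.2
      if jumlahcandi > st.1 then (jumlahcandi, usernamejin) else st)
    ((0 : Int), usernamejinTerajin)
  res.2

-- ===== PORT B =====
def jinTerajin_alt (usersdata : List (List String)) (candi : List (List String)) : String :=
  let counts : PySem.Dict String Int :=
    candi.foldl (fun d row =>
      d.insert (PySem.List.pyGetD row 1 "") (d.getD (PySem.List.pyGetD row 1 "") 0 + 1))
      PySem.Dict.empty
  let pairs : List (String × Int) :=
    (usersdata.filter (fun u => PySem.List.pyGetD u 2 "" == "jin_pembangun")).map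
      (fun u => (PySem.List.pyGetD u 0 "", counts.getD (PySem.List.pyGetD u 0 "") 0))
  match PySem.List.sorted pairs (fun p => p.2) true with
  | [] => "-"
  | best :: _ => if best.2 > 0 then best.1 else "-"

-- ===== PRECONDITION & SPEC =====
-- Pre_ excludes inputs where a usersdata row has fewer than 3 fields or a candi row fewer
-- than 2: there A raises IndexError, except that A happens not to touch candi rows at all
-- when no jin_pembangun user exists (it returns '-'), while B's counter pass reads every
-- candi row; those accidental-return inputs are excluded too.
def Pre_jinTerajin (usersdata : List (List String)) (candi : List (List String)) : Prop :=
  (∀ u ∈ usersdata, 3 ≤ u.length) ∧ (∀ c ∈ candi, 2 ≤ c.length)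
instance (usersdata : List (List String)) (candi : List (List String)) : Decidable (Pre_jinTerajin usersdata candi) := by unfold Pre_jinTerajin; infer_instance

def pvWitness_jinTerajin : List (List String) × List (List String) :=
  ([["alice", "pw", "jin_pembangun"], ["bob", "pw", "raja"]],
   [["c1", "alice"], ["c2", "bob"]])

def Spec_jinTerajin (usersdata : List (List String)) (candi : List (List String)) (out : String) : Prop := out = jinTerajin_alt usersdata candi
instance (usersdata : List (List String)) (candi : List (List String)) (out : String) : Decidable (Spec_jinTerajin usersdata candi out) := by unfold Spec_jinTerajin; infer_instance

-- ===== CLAIM (what is proved, stated in full; the proofs are below) =====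
def Claim_equal_jinTerajin : Prop := ∀ (usersdata : List (List String)) (candi : List (List String)), Dom_jinTerajin usersdata candi → Pre_jinTerajin usersdata candi → Spec_jinTerajin usersdata candi (jinTerajin usersdata candi)

-- ===== LEMMAS AND PROOFS =====

-- head of insertBy with the reverse-sort ordering: the head is replaced iff the new key is strictly larger
theorem pv_insertBy_head (x : String × Int) (acc : List (String × Int)) :
    (PySem.List.insertBy (fun a b => decide (b.2 < a.2)) x acc).head? =
      some (match acc.head? with
            | none => x
            | some h => if h.2 < x.2 then x else h) := by
  cases acc with
  | nil => simp [PySem.List.insertBy]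
  | cons h t =>
    simp only [PySem.List.insertBy, List.head?]
    split_ifs with hlt <;> simp_all

-- invariant tying A's strict-> scan state to the head of the insertion-sorted list
def pvInv (acc : List (String × Int)) (st : Int × String) : Prop :=
  (acc.head? = none ∧ st = (0, "-")) ∨
  (∃ h, acc.head? = some h ∧
    ((0 < h.2 ∧ st = (h.2, h.1)) ∨ (h.2 = 0 ∧ st = (0, "-"))))

theorem pv_scan_insert_aux (L : List (String × Int)) :
    ∀ (acc : List (String × Int)) (st : Int × String),
      (∀ p ∈ L, 0 ≤ p.2) → pvInv acc st →
      pvInv (L.foldl (fun a x => PySem.List.insertBy (fun a b => decide (b.2 < a.2)) x a) acc)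
            (L.foldl (fun st q => if q.2 > st.1 then (q.2, q.1) else st) st) := by
  induction L with
  | nil => intro acc st _ hI; exact hI
  | cons x xs ih =>
    intro acc st hpos hI
    have hx : 0 ≤ x.2 := hpos x (List.mem_cons_self ..)
    have hxs : ∀ p ∈ xs, 0 ≤ p.2 := fun p hp => hpos p (List.mem_cons_of_mem _ hp)
    simp only [List.foldl_cons]
    apply ih _ _ hxs
    have hhead := pv_insertBy_head x acc
    unfold pvInv at hI ⊢
    rcases hI with ⟨hn, hst⟩ | ⟨h, hh, hcase⟩
    · -- acc empty, st = (0,"-")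
      rw [hn] at hhead
      subst hst
      refine Or.inr ⟨x, hhead, ?_⟩
      by_cases h0 : 0 < x.2
      · left; exact ⟨h0, by simp [h0]⟩
      · right
        have : x.2 = 0 := le_antisymm (not_lt.mp h0) hx
        exact ⟨this, by simp [this]⟩
    · rw [hh] at hhead
      rcases hcase with ⟨hpos', hst⟩ | ⟨hz, hst⟩
      · -- head h with 0 < h.2, st = (h.2, h.1)
        subst hst
        by_cases hlt : h.2 < x.2
        · refine Or.inr ⟨x, by rw [hhead]; simp [hlt], Or.inl ⟨lt_trans hpos' hlt, ?_⟩⟩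
          simp [gt_iff_lt, hlt]
        · refine Or.inr ⟨h, by rw [hhead]; simp [hlt], Or.inl ⟨hpos', ?_⟩⟩
          simp [gt_iff_lt, hlt]
      · -- head h with h.2 = 0, st = (0,"-")
        subst hst
        by_cases h0 : 0 < x.2
        · have hlt : h.2 < x.2 := by omega
          refine Or.inr ⟨x, by rw [hhead]; simp [hlt], Or.inl ⟨h0, ?_⟩⟩
          simp [gt_iff_lt, h0]
        · have hx0 : x.2 = 0 := le_antisymm (not_lt.mp h0) hx
          have hnlt : ¬ h.2 < x.2 := by omega
          refine Or.inr ⟨h, by rw [hhead]; simp [hnlt], Or.inr ⟨hz, ?_⟩⟩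
          simp [gt_iff_lt, hx0]

-- A's strict-> scan over a list of nonnegative counts equals picking the head of the
-- stable descending sort (and '-' when it is empty or its count is 0)
theorem pv_scan_eq_sorted_head (L : List (String × Int)) (hpos : ∀ p ∈ L, 0 ≤ p.2) :
    (L.foldl (fun st q => if q.2 > st.1 then (q.2, q.1) else st) ((0 : Int), "-")).2 =
      (match PySem.List.sorted L (fun p => p.2) true with
       | [] => "-"
       | best :: _ => if best.2 > 0 then best.1 else "-") := by
  have hfold := pv_scan_insert_aux L [] ((0 : Int), "-") hpos (Or.inl ⟨rfl, rfl⟩)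
  rw [PySem.List.sorted_rev_eq_foldl_insertBy]
  unfold pvInv at hfold
  rcases hfold with ⟨hn, hst⟩ | ⟨h, hh, hcase⟩
  · rw [List.head?_eq_none_iff] at hn
    rw [hn, hst]
  · obtain ⟨t, ht⟩ : ∃ t, L.foldl (fun a x => PySem.List.insertBy (fun a b => decide (b.2 < a.2)) x a) [] = h :: t := by
      cases hEq : L.foldl (fun a x => PySem.List.insertBy (fun a b => decide (b.2 < a.2)) x a) [] with
      | nil => rw [hEq] at hh; simp at hh
      | cons a t => rw [hEq] at hh; simp at hh; exact ⟨t, by rw [hh]⟩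
    rw [ht]
    rcases hcase with ⟨hpos', hst⟩ | ⟨hz, hst⟩
    · rw [hst]; simp [gt_iff_lt, hpos']
    · rw [hst]; simp [gt_iff_lt, hz]

-- count of a name among candi owners: A's inner loop equals B's counter lookup
theorem pv_count_eq (candi : List (List String)) (nm : String) :
    ((candi.foldl (fun d row =>
        d.insert (PySem.List.pyGetD row 1 "") (d.getD (PySem.List.pyGetD row 1 "") 0 + 1))
        PySem.Dict.empty).getD nm 0)
      = candi.foldl (fun c row =>
          if PySem.List.pyGetD row 1 "" == nm then c + 1 else c) (0 : Int) := by
  have h1 : candi.foldl (fun d row =>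
        d.insert (PySem.List.pyGetD row 1 "") (d.getD (PySem.List.pyGetD row 1 "") 0 + 1))
        PySem.Dict.empty
      = PySem.Dict.counter (candi.map (fun row => PySem.List.pyGetD row 1 "")) := by
    rw [← PySem.Dict.foldl_insert_getD_add_one_eq_counter, List.foldl_map]
  rw [h1, PySem.Dict.getD_counter, PySem.List.foldl_count_if]
  simp [List.count, List.countP_map, Function.comp_def]

-- A's pair-building loop (nested scan) builds exactly B's (user, counter-lookup) pairs
theorem pv_listJin_eq (usersdata candi : List (List String)) :
    (PySem.List.pyRange 0 (PySem.List.len usersdata)).foldl (fun acc i =>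
      if PySem.List.pyGetD (PySem.List.pyGetD usersdata i []) 2 "" == "jin_pembangun" then
        acc ++ [(PySem.List.pyGetD (PySem.List.pyGetD usersdata i []) 0 "",
          (PySem.List.pyRange 0 (PySem.List.len candi)).foldl (fun c j =>
            if PySem.List.pyGetD (PySem.List.pyGetD candi j []) 1 "" ==
                PySem.List.pyGetD (PySem.List.pyGetD usersdata i []) 0 "" then c + 1 else c)
            (0 : Int))]
      else acc) []
    = (usersdata.filter (fun u => PySem.List.pyGetD u 2 "" == "jin_pembangun")).map
        (fun u => (PySem.List.pyGetD u 0 "",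
          (candi.foldl (fun d row =>
            d.insert (PySem.List.pyGetD row 1 "") (d.getD (PySem.List.pyGetD row 1 "") 0 + 1))
            PySem.Dict.empty).getD (PySem.List.pyGetD u 0 "") 0)) := by
  have hinner : ∀ nm : String,
      (PySem.List.pyRange 0 (PySem.List.len candi)).foldl (fun c j =>
        if PySem.List.pyGetD (PySem.List.pyGetD candi j []) 1 "" == nm then c + 1 else c)
        (0 : Int)
      = (candi.foldl (fun d row =>
          d.insert (PySem.List.pyGetD row 1 "") (d.getD (PySem.List.pyGetD row 1 "") 0 + 1))
          PySem.Dict.empty).getD nm 0 := by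
    intro nm
    rw [PySem.List.foldl_pyRange_pyGetD candi ([] : List String)
      (fun c row => if PySem.List.pyGetD row 1 "" == nm then c + 1 else c) (0 : Int) (le_refl 0)]
    simp only [Int.toNat_zero, List.drop_zero]
    rw [pv_count_eq]
  rw [PySem.List.foldl_pyRange_pyGetD usersdata ([] : List String)
    (fun acc u =>
      if PySem.List.pyGetD u 2 "" == "jin_pembangun" then
        acc ++ [(PySem.List.pyGetD u 0 "",
          (PySem.List.pyRange 0 (PySem.List.len candi)).foldl (fun c j =>
            if PySem.List.pyGetD (PySem.List.pyGetD candi j []) 1 "" ==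
                PySem.List.pyGetD u 0 "" then c + 1 else c) (0 : Int))]
      else acc) ([] : List (String × Int)) (le_refl 0)]
  simp only [Int.toNat_zero, List.drop_zero, hinner]
  rw [PySem.List.foldl_append_if]
  simp

-- ===== VERDICT (by name: the statement is the Claim_ definition above) =====
theorem jinTerajin_spec : Claim_equal_jinTerajin := by
  intro usersdata candi _hdom _hpre
  unfold Spec_jinTerajin
  simp only [jinTerajin, jinTerajin_alt]
  rw [pv_listJin_eq usersdata candi]
  set pairs : List (String × Int) := (usersdata.filter (fun u => PySem.List.pyGetD u 2 "" == "jin_pembangun")).map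
      (fun u => (PySem.List.pyGetD u 0 "",
        (candi.foldl (fun d row =>
          d.insert (PySem.List.pyGetD row 1 "") (d.getD (PySem.List.pyGetD row 1 "") 0 + 1))
          PySem.Dict.empty).getD (PySem.List.pyGetD u 0 "") 0)) with hpairs
  rw [PySem.List.foldl_pyRange_pyGetD pairs (("", 0) : String × Int)
    (fun st (q : String × Int) => if q.2 > st.1 then (q.2, q.1) else st)
    (((0 : Int), "-") : Int × String) (le_refl 0)]
  simp only [Int.toNat_zero, List.drop_zero]
  have hpos : ∀ p ∈ pairs, 0 ≤ p.2 := by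
    intro p hp
    rw [hpairs] at hp
    simp only [List.mem_map] at hp
    obtain ⟨u, _, rfl⟩ := hp
    simp only
    rw [pv_count_eq, PySem.List.foldl_count_if]
    simp
  rw [pv_scan_eq_sorted_head pairs hpos]
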